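-- pv_equiv track=rewrite | github.com/GDoutre8/machinetomarket | _ctl_phase2_audit.py | get_present
-- ===== SOURCE A (Python) =====
-- V1_FIELDS = [
--     'horsepower_hp',
--     'rated_operating_capacity_lbs',
--     'tipping_load_lbs',
--     'operating_weight_lbs',
--     'aux_flow_standard_gpm',
--     'travel_speed_high_mph',
--     'width_over_tires_in',
--     'bucket_hinge_pin_height_in',
-- ]
--
-- def get_present(r):
--     """Return set of V1 fields that are present and non-null in r's specs."""
--     specs = r.get('specs', {})
--     present = set()
--     for f in V1_FIELDS:
--         if f == 'aux_flow_standard_gpm':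
--             # accept the hydraulic_flow_* alt key used by some CTL records
--             if (specs.get('aux_flow_standard_gpm') is not None or
--                     specs.get('hydraulic_flow_standard_gpm') is not None):
--                 present.add(f)
--         else:
--             if specs.get(f) is not None:
--                 present.add(f)
--     return present
-- ===== SOURCE B (Python) =====
-- V1_FIELDS = [
--     'horsepower_hp',
--     'rated_operating_capacity_lbs',
--     'tipping_load_lbs',
--     'operating_weight_lbs',
--     'aux_flow_standard_gpm',
--     'travel_speed_high_mph',
--     'width_over_tires_in',
--     'bucket_hinge_pin_height_in',
-- ]
--
-- def get_present(r):
--     """Return set of V1 fields that are present and non-null in r's specs."""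
--     specs = r.get('specs', {})
--     present_keys = {k for k, v in specs.items() if v is not None}
--     if 'hydraulic_flow_standard_gpm' in present_keys:
--         present_keys.add('aux_flow_standard_gpm')
--     return set(V1_FIELDS) & present_keys
-- ===== Notes on version B (the rewrite author's own statement) =====
-- stated objective: idiomatic
-- what changed: B builds the set of non-null spec keys in one comprehension pass and intersects it with the fixed field set, reconciling the hydraulic_flow alt key once, instead of A's loop that probes specs.get for each target field with a special-cased branch; Pre_ excludes model-only inputs whose specs association list has duplicate keys (unrepresentable as a Python dict), where A reads only the first binding of a key but B's comprehension sees every binding.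
import Mathlib
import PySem

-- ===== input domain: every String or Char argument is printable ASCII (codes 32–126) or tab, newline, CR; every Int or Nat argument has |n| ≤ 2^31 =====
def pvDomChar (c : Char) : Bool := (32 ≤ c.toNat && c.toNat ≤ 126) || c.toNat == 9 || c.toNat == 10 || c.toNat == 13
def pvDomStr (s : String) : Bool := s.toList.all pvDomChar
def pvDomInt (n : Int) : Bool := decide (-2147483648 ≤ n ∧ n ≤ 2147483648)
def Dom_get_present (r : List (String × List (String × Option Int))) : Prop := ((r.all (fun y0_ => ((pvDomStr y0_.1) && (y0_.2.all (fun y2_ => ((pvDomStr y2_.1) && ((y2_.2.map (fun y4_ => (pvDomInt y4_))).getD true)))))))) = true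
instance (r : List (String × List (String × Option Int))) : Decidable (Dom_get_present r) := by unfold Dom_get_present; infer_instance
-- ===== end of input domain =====

-- B builds the set of non-null spec keys in one pass and intersects it with the fixed
-- field set (idiomatic set algebra), instead of probing each target field in turn.

def V1_FIELDS : List String :=
  ["horsepower_hp",
   "rated_operating_capacity_lbs",
   "tipping_load_lbs",
   "operating_weight_lbs",
   "aux_flow_standard_gpm",
   "travel_speed_high_mph",
   "width_over_tires_in",
   "bucket_hinge_pin_height_in"]

-- ===== PORT A =====
-- specs = r.get('specs', {}); for f in V1_FIELDS: probe specs.get(f) (alt key for aux flow)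
def get_present (r : List (String × List (String × Option Int))) : List String :=
  let specs : List (String × Option Int) := ((PySem.Dict.mk r).get? "specs").getD []
  V1_FIELDS.foldl
    (fun present f =>
      if f == "aux_flow_standard_gpm" then
        if ((PySem.Dict.mk specs).getD "aux_flow_standard_gpm" none).isSome
            || ((PySem.Dict.mk specs).getD "hydraulic_flow_standard_gpm" none).isSome then
          PySem.Set.add present f
        else present
      else
        if ((PySem.Dict.mk specs).getD f none).isSome then PySem.Set.add present f
        else present)
    PySem.Set.empty

-- ===== PORT B =====
-- present_keys = {k for k, v in specs.items() if v is not None}; reconcile alt key; intersect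
def get_present_alt (r : List (String × List (String × Option Int))) : List String :=
  let specs : List (String × Option Int) := ((PySem.Dict.mk r).get? "specs").getD []
  let presentKeys : PySem.Set String :=
    PySem.Set.ofList ((((PySem.Dict.mk specs).items.filter (fun kv => kv.2.isSome)).map Prod.fst))
  let presentKeys' : PySem.Set String :=
    if presentKeys.contains "hydraulic_flow_standard_gpm" then
      PySem.Set.add presentKeys "aux_flow_standard_gpm"
    else presentKeys
  PySem.Set.inter (PySem.Set.ofList V1_FIELDS) presentKeys'

-- ===== PRECONDITION & SPEC =====
-- Pre_ excludes inputs whose 'specs' association list has duplicate keys: a Python dict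
-- cannot carry duplicate keys, so these model-only inputs have no canonical behaviour
-- (A reads the first binding of a key, B's comprehension sees every binding).
def Pre_get_present (r : List (String × List (String × Option Int))) : Prop :=
  (((((PySem.Dict.mk r).get? "specs").getD []).map Prod.fst).Nodup)
instance (r : List (String × List (String × Option Int))) : Decidable (Pre_get_present r) := by
  unfold Pre_get_present; infer_instance

def pvWitness_get_present : (List (String × List (String × Option Int))) :=
  [("specs", [("horsepower_hp", some 74), ("tipping_load_lbs", none),
              ("hydraulic_flow_standard_gpm", some 23)])]

def Spec_get_present (r : List (String × List (String × Option Int))) (out : List String) : Prop := out = get_present_alt r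
instance (r : List (String × List (String × Option Int))) (out : List String) : Decidable (Spec_get_present r out) := by unfold Spec_get_present; infer_instance

-- ===== CLAIM (what is proved, stated in full; the proofs are below) =====
def Claim_equal_get_present : Prop := ∀ (r : List (String × List (String × Option Int))), Dom_get_present r → Pre_get_present r → Spec_get_present r (get_present r)

-- ===== LEMMAS AND PROOFS =====

theorem map_filter_fst_subset (l : List (String × Option Int)) (k : String)
    (h : k ∈ (l.filter (fun kv => kv.2.isSome)).map Prod.fst) : k ∈ l.map Prod.fst := by
  obtain ⟨kv, hmem, rfl⟩ := List.mem_map.mp h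
  exact List.mem_map_of_mem (List.mem_of_mem_filter hmem)

-- A's loop, with the per-field test abstracted as `cond`, is a filter of the field list.
theorem foldl_addIf_eq_filter (cond : String → Bool) :
    ∀ (l : List String) (s : List String), l.Nodup → (∀ x ∈ l, x ∉ s) →
      l.foldl (fun p f => if cond f then PySem.Set.add p f else p) s = s ++ l.filter cond := by
  intro l
  induction l with
  | nil => intro s _ _; simp
  | cons x xs ih =>
    intro s hnd hdis
    simp only [List.foldl_cons]
    by_cases hc : cond x
    · rw [if_pos hc, PySem.Set.add_of_not_mem (hdis x (by simp))]
      rw [ih (s ++ [x]) hnd.of_cons]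
      · simp [hc]
      · intro y hy
        simp only [List.mem_append, List.mem_singleton]
        rintro (h | rfl)
        · exact hdis y (by simp [hy]) h
        · exact (List.nodup_cons.mp hnd).1 hy
    · rw [if_neg hc, ih s hnd.of_cons (fun y hy => hdis y (by simp [hy]))]
      simp [hc]

-- membership in B's comprehension set = A's non-null probe, for duplicate-free specs
theorem contains_presentKeys (specs : List (String × Option Int)) (k : String)
    (hnd : (specs.map Prod.fst).Nodup) :
    (PySem.Set.ofList ((specs.filter (fun kv => kv.2.isSome)).map Prod.fst)).contains k
      = ((PySem.Dict.mk specs).getD k none).isSome := by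
  induction specs with
  | nil => simp [PySem.Dict.getD, PySem.Dict.get?]
  | cons p rest ih =>
    obtain ⟨a, v⟩ := p
    have hnd' : (rest.map Prod.fst).Nodup := (List.nodup_cons.mp hnd).2
    have ha : a ∉ rest.map Prod.fst := (List.nodup_cons.mp hnd).1
    rw [PySem.Dict.getD_eq_get?_getD, PySem.Dict.get?_mk_cons]
    by_cases hk : a = k
    · subst hk
      simp only [beq_self_eq_true, if_pos]
      cases v with
      | some n =>
        rw [Bool.eq_iff_iff]
        simp [PySem.Set.mem_ofList]
      | none =>
        rw [Bool.eq_iff_iff]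
        simp only [List.filter_cons, Option.isSome_none, Bool.false_eq_true, if_false,
          PySem.Set.contains_iff, PySem.Set.mem_ofList]
        constructor
        · intro h
          exact absurd (map_filter_fst_subset rest a h) ha
        · simp
    · rw [if_neg (by simpa using hk)]
      rw [← PySem.Dict.getD_eq_get?_getD, ← ih hnd']
      rw [Bool.eq_iff_iff]
      simp only [List.filter_cons]
      by_cases hv : v.isSome
      · simp only [hv, if_pos]
        simp [PySem.Set.mem_ofList, Ne.symm hk]
      · simp [hv]

theorem contains_add_set (s : PySem.Set String) (x y : String) :
    (PySem.Set.add s x).contains y = (s.contains y || (y == x)) := by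
  rw [Bool.eq_iff_iff]; simp [PySem.Set.mem_add]

-- the core identity, stated over the extracted specs list
theorem main_eq (specs : List (String × Option Int))
    (hnd : (specs.map Prod.fst).Nodup) :
    V1_FIELDS.foldl
      (fun present f =>
        if f == "aux_flow_standard_gpm" then
          if ((PySem.Dict.mk specs).getD "aux_flow_standard_gpm" none).isSome
              || ((PySem.Dict.mk specs).getD "hydraulic_flow_standard_gpm" none).isSome then
            PySem.Set.add present f
          else present
        else
          if ((PySem.Dict.mk specs).getD f none).isSome then PySem.Set.add present f
          else present)
      PySem.Set.empty
    = PySem.Set.inter (PySem.Set.ofList V1_FIELDS)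
        (let pk : PySem.Set String := PySem.Set.ofList
            (((PySem.Dict.mk specs).items.filter (fun kv => kv.2.isSome)).map Prod.fst)
         if pk.contains "hydraulic_flow_standard_gpm" then
           PySem.Set.add pk "aux_flow_standard_gpm"
         else pk) := by
  have hV1 : PySem.Set.ofList V1_FIELDS = V1_FIELDS :=
    PySem.Set.ofList_eq_self_of_nodup (xs := V1_FIELDS) (by decide)
  set pk : PySem.Set String := PySem.Set.ofList
      (((PySem.Dict.mk specs).items.filter (fun kv => kv.2.isSome)).map Prod.fst) with hpk
  have hpkc : ∀ k, pk.contains k = ((PySem.Dict.mk specs).getD k none).isSome := by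
    intro k; rw [hpk]; exact contains_presentKeys specs k hnd
  set pk' : PySem.Set String :=
    if pk.contains "hydraulic_flow_standard_gpm" then
      PySem.Set.add pk "aux_flow_standard_gpm" else pk with hpk'
  have hinter : PySem.Set.inter (PySem.Set.ofList V1_FIELDS) pk'
      = V1_FIELDS.filter (fun f => pk'.contains f) := by
    rw [hV1]; rfl
  have hcondfun : (fun (present : List String) (f : String) =>
      if f == "aux_flow_standard_gpm" then
        if ((PySem.Dict.mk specs).getD "aux_flow_standard_gpm" none).isSome
            || ((PySem.Dict.mk specs).getD "hydraulic_flow_standard_gpm" none).isSome then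
          PySem.Set.add present f
        else present
      else
        if ((PySem.Dict.mk specs).getD f none).isSome then PySem.Set.add present f
        else present)
      = (fun (present : List String) (f : String) =>
          if (if f == "aux_flow_standard_gpm" then
                ((PySem.Dict.mk specs).getD "aux_flow_standard_gpm" none).isSome
                  || ((PySem.Dict.mk specs).getD "hydraulic_flow_standard_gpm" none).isSome
              else ((PySem.Dict.mk specs).getD f none).isSome) then
            PySem.Set.add present f else present) := by
    funext present f
    by_cases h : f == "aux_flow_standard_gpm" <;> simp [h]
  rw [hcondfun,
    foldl_addIf_eq_filter _ V1_FIELDS PySem.Set.empty (by decide) (by intro x _; simp [PySem.Set.empty]),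
    hinter]
  simp only [PySem.Set.empty, List.nil_append]
  apply List.filter_congr
  intro f hf
  have hcont : ∀ g : String, pk'.contains g
      = (pk.contains g || (pk.contains "hydraulic_flow_standard_gpm"
          && (g == "aux_flow_standard_gpm"))) := by
    intro g
    rw [hpk']
    by_cases hh : pk.contains "hydraulic_flow_standard_gpm"
    · rw [if_pos hh, contains_add_set, hh]; simp
    · rw [if_neg hh]
      simp only [Bool.not_eq_true] at hh
      rw [hh]
      simp
  by_cases haux : f = "aux_flow_standard_gpm"
  · subst haux
    rw [hcont, hpkc, hpkc]
    simp
  · rw [if_neg (by simpa using haux), hcont, hpkc]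
    simp [haux]

-- ===== VERDICT (by name: the statement is the Claim_ definition above) =====
theorem get_present_spec : Claim_equal_get_present := by
  intro r _ hpre
  exact main_eq (((PySem.Dict.mk r).get? "specs").getD []) hpre
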